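-- pv_equiv track=rewrite | github.com/qiime2/qiime2 | qiime2/core/util.py | from_checksum_format
-- ===== SOURCE A (Python) =====
-- def from_checksum_format(line):
--     line = line.rstrip('\n')
--     parts = line.split('  ', 1)
--     if len(parts) < 2:
--         parts = line.split(' *', 1)
--
--     checksum, filepath = parts
--
--     if checksum[0] == '\\':
--         chars = ''
--         escape = False
--         # Gross, but regular `.replace` will overlap with itself and
--         # negative lookbehind in regex is *probably* harder than scanning
--         for char in filepath:
--             # 1) Escape next character
--             if not escape and char == '\\':
--                 escape = True
--                 continue
--
--             # 2) Handle escape sequence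
--             if escape:
--                 try:
--                     chars += {'\\': '\\', 'n': '\n'}[char]
--                 except KeyError:
--                     chars += '\\' + char  # Wasn't an escape after all
--                 escape = False
--                 continue
--
--             # 3) Nothing interesting
--             chars += char
--
--         checksum = checksum[1:]
--         filepath = chars
--
--     return filepath, checksum
-- ===== SOURCE B (Python) =====
-- def from_checksum_format(line):
--     line = line.rstrip('\n')
--     parts = line.split('  ', 1)
--     if len(parts) < 2:
--         parts = line.split(' *', 1)
--
--     checksum, filepath = parts
--
--     if checksum[0] == '\\':
--         # Staged passes instead of a char scanner: split the path on backslashes,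
--         # then stitch the segments back, decoding each boundary by looking at the
--         # first character of the following segment.
--         segs = filepath.split('\\')
--         out = [segs[0]]
--         i = 1
--         while i < len(segs):
--             s = segs[i]
--             if s == '':
--                 # boundary backslash escapes another backslash (next boundary),
--                 # or is a lone trailing backslash, which is dropped
--                 if i + 1 < len(segs):
--                     out.append('\\' + segs[i + 1])
--                 i += 2
--             elif s[0] == 'n':
--                 out.append('\n' + s[1:])
--                 i += 1
--             else:
--                 out.append('\\' + s)  # wasn't an escape after all
--                 i += 1
--         filepath = ''.join(out)
--         checksum = checksum[1:]
--
--     return filepath, checksum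
-- ===== Notes on version B (the rewrite author's own statement) =====
-- stated objective: alternative
-- what changed: The char-by-char escape-flag scanner is replaced by staged passes: split the filepath on backslashes once, then stitch the segments back with an index loop that decodes each boundary from the first character of the following segment.
import Mathlib
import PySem

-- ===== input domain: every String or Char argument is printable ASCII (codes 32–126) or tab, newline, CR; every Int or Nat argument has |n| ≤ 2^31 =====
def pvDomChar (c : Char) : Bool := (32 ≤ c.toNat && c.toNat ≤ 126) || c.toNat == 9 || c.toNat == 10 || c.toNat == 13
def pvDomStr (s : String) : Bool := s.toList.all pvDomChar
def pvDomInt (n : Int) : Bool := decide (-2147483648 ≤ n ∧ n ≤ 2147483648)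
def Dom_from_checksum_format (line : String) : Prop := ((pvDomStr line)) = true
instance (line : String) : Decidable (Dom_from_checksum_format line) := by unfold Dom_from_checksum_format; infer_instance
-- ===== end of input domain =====

-- B replaces A's escape-flag character scanner with staged passes: split the path on
-- backslashes once, then stitch the segments back, decoding each boundary from the
-- head of the following segment (different algorithm, same values).

-- ===== PORT A =====
-- one step of A's loop body: state = (escape, chars)
def escStep (p : Bool × List Char) (ch : Char) : Bool × List Char :=
  if !p.1 && ch == '\\' then (true, p.2)
  else if p.1 then
    (false, p.2 ++ (if ch == '\\' then ['\\'] else if ch == 'n' then ['\n'] else ['\\', ch]))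
  else (false, p.2 ++ [ch])

def from_checksum_format (line : String) : String × String :=
  -- line.rstrip('\n') (exact hand port: drops exactly the trailing '\n' characters),
  -- then parts = line.split('  ', 1); if len(parts) < 2: parts = line.split(' *', 1)
  let l := (line.toList.reverse.dropWhile (· == '\n')).reverse
  let parts0 := PySem.Chars.splitOnMax l [' ', ' '] 1
  let parts := if parts0.length < 2 then PySem.Chars.splitOnMax l [' ', '*'] 1 else parts0
  match parts with
  | [checksum, filepath] =>
    match checksum with
    | [] => (String.ofList filepath, String.ofList checksum)  -- Python: IndexError on checksum[0] (excluded by Pre_; dummy)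
    | c0 :: ctail =>
      if c0 = '\\' then
        let chars := (filepath.foldl escStep (false, [])).2
        (String.ofList chars, String.ofList ctail)    -- ctail = checksum[1:]
      else (String.ofList filepath, String.ofList checksum)
  | _ => ("", "")             -- Python: ValueError unpacking parts (excluded by Pre_)

-- ===== PORT B =====
-- exact hand port of filepath.split('\\') (single-character separator, no limit)
def splitBS : List Char → List (List Char)
  | [] => [[]]
  | c :: r =>
    if c = '\\' then [] :: splitBS r
    else
      match splitBS r with
      | [] => [[c]]                       -- unreachable: splitBS never returns []
      | h :: t => (c :: h) :: t

-- the while loop over segs[1:]: each step decodes one boundary backslash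
def stitchTail : List (List Char) → List Char
  | [] => []
  | [] :: rest =>                          -- s == '': escaped backslash or lone trailing one
    (match rest with
     | [] => []                            -- lone trailing backslash: dropped
     | t :: r => '\\' :: t ++ stitchTail r)
  | (c :: s) :: rest =>
    (if c = 'n' then '\n' :: s else '\\' :: c :: s) ++ stitchTail rest

def unescapeSplit (fp : List Char) : List Char :=
  match splitBS fp with
  | [] => []                               -- unreachable
  | h :: t => h ++ stitchTail t            -- out = [segs[0]] ++ …; ''.join(out)

def from_checksum_format_alt (line : String) : String × String :=
  -- line.rstrip('\n') (exact hand port: drops exactly the trailing '\n' characters),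
  -- then parts = line.split('  ', 1); if len(parts) < 2: parts = line.split(' *', 1)
  let l := (line.toList.reverse.dropWhile (· == '\n')).reverse
  let parts0 := PySem.Chars.splitOnMax l [' ', ' '] 1
  let parts := if parts0.length < 2 then PySem.Chars.splitOnMax l [' ', '*'] 1 else parts0
  if parts.length == 2 then          -- checksum, filepath = parts (raises unless exactly 2)
    let checksum := (PySem.List.pyGet? parts 0).getD []
    let filepath := (PySem.List.pyGet? parts 1).getD []
    if PySem.List.pyGet? checksum 0 = some '\\' then   -- checksum[0] == '\\' (none: IndexError, excluded by Pre_)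
      (String.ofList (unescapeSplit filepath),
       String.ofList (PySem.List.slice checksum (some 1) none))   -- checksum[1:]
    else (String.ofList filepath, String.ofList checksum)
  else ("", "")                      -- Python: ValueError unpacking parts (excluded by Pre_)

-- ===== PRECONDITION & SPEC =====
-- Pre_ excludes exactly the inputs where A raises: lines without a two-space or
-- space-asterisk separator (ValueError on unpacking) and lines whose checksum field is
-- empty, i.e. the stripped line starts with the separator (IndexError on checksum[0]).
def Pre_from_checksum_format (line : String) : Prop :=
  let l := (line.toList.reverse.dropWhile (· == '\n')).reverse
  if PySem.Chars.isIn [' ', ' '] l then PySem.Chars.startswith l [' ', ' '] = false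
  else PySem.Chars.isIn [' ', '*'] l = true ∧ PySem.Chars.startswith l [' ', '*'] = false
instance (line : String) : Decidable (Pre_from_checksum_format line) := by
  unfold Pre_from_checksum_format; infer_instance

def pvWitness_from_checksum_format : String := "\\abc  fi\\nle"

def Spec_from_checksum_format (line : String) (out : String × String) : Prop :=
  out = from_checksum_format_alt line
instance (line : String) (out : String × String) : Decidable (Spec_from_checksum_format line out) := by
  unfold Spec_from_checksum_format; infer_instance

-- ===== CLAIM (what is proved, stated in full; the proofs are below) =====
def Claim_equal_from_checksum_format : Prop := ∀ (line : String), Dom_from_checksum_format line → Pre_from_checksum_format line → Spec_from_checksum_format line (from_checksum_format line)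

-- ===== LEMMAS AND PROOFS =====

-- proof-only characterization of A's scanner (used only below the claim block)
def uA : List Char → List Char
  | [] => []
  | c :: rest =>
    if c = '\\' then
      match rest with
      | [] => []
      | d :: r => (if d = '\\' then ['\\'] else if d = 'n' then ['\n'] else ['\\', d]) ++ uA r
    else c :: uA rest

lemma uA_cons_ne (c : Char) (rest : List Char) (hc : ¬ c = '\\') :
    uA (c :: rest) = c :: uA rest := by
  rw [uA.eq_def]; simp [hc]

lemma foldl_escStep_eq (f : List Char) : ∀ acc : List Char,
    (f.foldl escStep (false, acc)).2 = acc ++ uA f := by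
  induction f using uA.induct with
  | case1 => intro acc; simp [uA]
  | case2 => intro acc; simp [uA, escStep, List.foldl]
  | case3 d r ih =>
    intro acc
    simp only [List.foldl, uA]
    have h1 : escStep (false, acc) '\\' = (true, acc) := by simp [escStep]
    have h2 : escStep (true, acc) d =
        (false, acc ++ (if d = '\\' then ['\\'] else if d = 'n' then ['\n'] else ['\\', d])) := by
      by_cases hd : d = '\\' <;> by_cases hn : d = 'n' <;> simp [escStep, hd, hn]
    rw [h1, h2, ih]
    simp
  | case4 c rest hc ih =>
    intro acc
    have h1 : escStep (false, acc) c = (false, acc ++ [c]) := by simp [escStep, hc]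
    simp only [List.foldl]
    rw [h1, ih, uA_cons_ne c rest hc]
    simp

lemma splitBS_ne_nil (f : List Char) : splitBS f ≠ [] := by
  cases f with
  | nil => simp [splitBS]
  | cons c r =>
    rw [splitBS.eq_def]
    by_cases hc : c = '\\'
    · simp [hc]
    · simp only [hc, if_false]
      cases splitBS r <;> simp

lemma unescapeSplit_eq (r : List Char) (h : List Char) (t : List (List Char))
    (hsr : splitBS r = h :: t) : unescapeSplit r = h ++ stitchTail t := by
  unfold unescapeSplit; rw [hsr]

lemma uA_eq_unescapeSplit (f : List Char) : uA f = unescapeSplit f := by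
  induction f using uA.induct with
  | case1 => simp [uA, unescapeSplit, splitBS, stitchTail]
  | case2 => simp [uA, unescapeSplit, splitBS, stitchTail]
  | case3 d r ih =>
    obtain ⟨h, t, ht⟩ : ∃ h t, splitBS r = h :: t := by
      cases hsr : splitBS r with
      | nil => exact absurd hsr (splitBS_ne_nil r)
      | cons h t => exact ⟨h, t, rfl⟩
    have ih' : uA r = h ++ stitchTail t := ih.trans (unescapeSplit_eq r h t ht)
    by_cases hd : d = '\\'
    · subst hd
      rw [unescapeSplit_eq _ [] ([] :: h :: t) (by simp [splitBS, ht])]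
      simp [uA, stitchTail, ih']
    · by_cases hn : d = 'n'
      · subst hn
        rw [unescapeSplit_eq _ [] (('n' :: h) :: t) (by simp [splitBS, hd, ht])]
        simp [uA, stitchTail, ih']
      · rw [unescapeSplit_eq _ [] ((d :: h) :: t) (by simp [splitBS, hd, ht])]
        rw [uA.eq_def]
        simp [stitchTail, hd, hn, ih']
  | case4 c rest hc ih =>
    obtain ⟨h, t, ht⟩ : ∃ h t, splitBS rest = h :: t := by
      cases hsr : splitBS rest with
      | nil => exact absurd hsr (splitBS_ne_nil rest)
      | cons h t => exact ⟨h, t, rfl⟩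
    have ih' : uA rest = h ++ stitchTail t := ih.trans (unescapeSplit_eq rest h t ht)
    rw [uA_cons_ne c rest hc, unescapeSplit_eq _ (c :: h) t (by simp [splitBS, hc, ht]), ih']
    simp

lemma ports_agree (line : String) :
    from_checksum_format line = from_checksum_format_alt line := by
  unfold from_checksum_format from_checksum_format_alt
  dsimp only
  generalize (if (PySem.Chars.splitOnMax ((line.toList.reverse.dropWhile (· == '\n')).reverse) [' ', ' '] 1).length < 2
      then PySem.Chars.splitOnMax ((line.toList.reverse.dropWhile (· == '\n')).reverse) [' ', '*'] 1
      else PySem.Chars.splitOnMax ((line.toList.reverse.dropWhile (· == '\n')).reverse) [' ', ' '] 1) = parts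
  rcases parts with _ | ⟨c, _ | ⟨f, _ | ⟨g, t⟩⟩⟩ <;> try rfl
  rcases c with _ | ⟨c0, ctail⟩
  · simp [PySem.List.pyGet?, PySem.List.pyIdx?]
  · by_cases hc : c0 = '\\'
    · simp [PySem.List.pyGet?, PySem.List.pyIdx?, PySem.List.slice, hc,
        foldl_escStep_eq f [], uA_eq_unescapeSplit]
    · simp [PySem.List.pyGet?, PySem.List.pyIdx?, hc]

-- ===== VERDICT (by name: the statement is the Claim_ definition above) =====
theorem from_checksum_format_spec : Claim_equal_from_checksum_format := by
  intro line _ _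
  unfold Spec_from_checksum_format
  exact ports_agree line
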